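-- pv_equiv track=rewrite | github.com/DrFreiz01/TestingBot | src/scripts/py/testingModule.py | _get_list_dist_keys
-- ===== SOURCE A (Python) =====
-- def _get_list_dist_keys(data):
--     keys = list()
--     for item in data:
--         for key in item.keys():
--             if key not in keys:
--                 keys.append(key)
--     keys.sort()
--     return keys
-- ===== SOURCE B (Python) =====
-- def _get_list_dist_keys(data):
--     flat = []
--     for item in data:
--         flat.extend(item.keys())
--     flat.sort()
--     keys = []
--     for k in flat:
--         if keys and keys[-1] == k:
--             continue
--         keys.append(k)
--     return keys
-- ===== Notes on version B (the rewrite author's own statement) =====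
-- stated objective: faster
-- what changed: Instead of maintaining distinctness with a linear 'key not in keys' scan per key and sorting at the end, B flattens all keys into one list, sorts it once, and removes consecutive duplicates in a single scan of the sorted list.
import Mathlib
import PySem

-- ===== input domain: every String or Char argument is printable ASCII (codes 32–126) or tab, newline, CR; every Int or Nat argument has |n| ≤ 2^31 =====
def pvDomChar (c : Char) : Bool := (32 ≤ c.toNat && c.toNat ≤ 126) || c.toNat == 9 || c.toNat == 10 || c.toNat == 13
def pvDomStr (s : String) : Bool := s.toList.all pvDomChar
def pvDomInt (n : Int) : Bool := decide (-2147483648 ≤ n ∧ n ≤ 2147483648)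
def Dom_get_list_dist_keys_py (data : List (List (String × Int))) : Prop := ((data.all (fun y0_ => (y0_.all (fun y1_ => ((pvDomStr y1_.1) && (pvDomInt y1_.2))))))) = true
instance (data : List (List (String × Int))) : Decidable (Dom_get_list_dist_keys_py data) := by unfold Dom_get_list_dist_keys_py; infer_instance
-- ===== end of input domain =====

-- B collects all keys into one flat list, sorts it once, and drops consecutive duplicates
-- in a single scan, instead of A's append-if-not-already-seen scan followed by a sort.

-- ===== PORT A =====
-- 'for key in item.keys()' iterates a dict's keys = first occurrences in order; the
-- 'if key not in keys' dedup makes iterating the raw pair list's keys the same values.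
def get_list_dist_keys_py (data : List (List (String × Int))) : List String :=
  let keys := data.foldl
    (fun keys item =>
      item.foldl (fun keys kv => if kv.1 ∈ keys then keys else keys ++ [kv.1]) keys)
    ([] : List String)
  PySem.List.sorted keys (fun x => x) false   -- keys.sort()

-- ===== PORT B =====
def get_list_dist_keys_py_alt (data : List (List (String × Int))) : List String :=
  let flat := data.foldl (fun acc item => acc ++ item.map Prod.fst) ([] : List String)
  let srt := PySem.List.sorted flat (fun x => x) false   -- flat.sort()
  -- 'if keys and keys[-1] == k: continue' ; getLast? is none exactly when keys is empty
  srt.foldl (fun keys k => if keys.getLast? = some k then keys else keys ++ [k]) []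

-- ===== PRECONDITION & SPEC =====
def Spec_get_list_dist_keys_py (data : List (List (String × Int))) (out : List String) : Prop := out = get_list_dist_keys_py_alt data
instance (data : List (List (String × Int))) (out : List String) : Decidable (Spec_get_list_dist_keys_py data out) := by unfold Spec_get_list_dist_keys_py; infer_instance

-- ===== CLAIM (what is proved, stated in full; the proofs are below) =====
def Claim_equal_get_list_dist_keys_py : Prop := ∀ (data : List (List (String × Int))), Dom_get_list_dist_keys_py data → Spec_get_list_dist_keys_py data (get_list_dist_keys_py data)

-- ===== LEMMAS AND PROOFS =====

-- A's nested dedup loop is the append-if-new fold over the flattened key list.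
theorem aKeys_eq_flat_fold (data : List (List (String × Int))) (acc : List String) :
    data.foldl
      (fun keys item =>
        item.foldl (fun keys kv => if kv.1 ∈ keys then keys else keys ++ [kv.1]) keys) acc
    = (data.flatMap (fun item => item.map Prod.fst)).foldl
        (fun keys k => if k ∈ keys then keys else keys ++ [k]) acc := by
  induction data generalizing acc with
  | nil => rfl
  | cons item rest ih => simp [List.foldl_append, List.foldl_map, ih]

-- the append-if-new fold is PySem.Set.ofList
theorem flat_fold_eq_ofList (L : List String) :
    L.foldl (fun keys k => if k ∈ keys then keys else keys ++ [k]) []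
    = PySem.Set.ofList L := by
  rw [PySem.Set.ofList_eq_foldl]
  apply PySem.List.foldl_congr_mem
  intro keys k _
  simp [PySem.Set.add, PySem.Set.contains]

-- in a strictly increasing list every element is ≤ the last one
theorem le_getLast_of_pairwise_lt {xs : List String} {m a : String}
    (h : xs.Pairwise (· < ·)) (hm : xs.getLast? = some m) (ha : a ∈ xs) : a ≤ m := by
  induction xs generalizing a with
  | nil => simp at ha
  | cons x t ih =>
    rcases List.pairwise_cons.1 h with ⟨hx, ht⟩
    cases t with
    | nil =>
      simp at hm ha; subst hm; simp [ha]
    | cons y u =>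
      rw [List.getLast?_cons_cons] at hm
      rw [List.mem_cons] at ha
      rcases ha with rfl | ha
      · exact le_of_lt (lt_of_lt_of_le (hx y (by simp)) (ih ht hm (by simp)))
      · exact ih ht hm ha

-- invariant of B's adjacent-dedup fold over a weakly sorted list
theorem dd_inv (xs : List String) (acc : List String)
    (hacc : acc.Pairwise (· < ·)) (hxs : xs.Pairwise (· ≤ ·))
    (hle : ∀ a ∈ acc, ∀ x ∈ xs, a ≤ x) :
    (xs.foldl (fun keys k => if keys.getLast? = some k then keys else keys ++ [k]) acc).Pairwise (· < ·)
    ∧ ∀ y, (y ∈ xs.foldl (fun keys k => if keys.getLast? = some k then keys else keys ++ [k]) acc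
            ↔ y ∈ acc ∨ y ∈ xs) := by
  induction xs generalizing acc with
  | nil => exact ⟨hacc, fun y => by simp⟩
  | cons k rest ih =>
    rcases List.pairwise_cons.1 hxs with ⟨hk, hrest⟩
    by_cases hlast : acc.getLast? = some k
    · have hkmem : k ∈ acc := List.mem_of_getLast? hlast
      have h := ih acc hacc hrest (fun a ha x hx => hle a ha x (by simp [hx]))
      refine ⟨by simpa [hlast] using h.1, ?_⟩
      intro y
      have := h.2 y
      simp only [List.foldl_cons, if_pos hlast]
      rw [this]
      constructor
      · rintro (h' | h'); · exact Or.inl h'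
        · exact Or.inr (by simp [h'])
      · rintro (h' | h')
        · exact Or.inl h'
        · rcases (by simpa using h' : y = k ∨ y ∈ rest) with rfl | h''
          · exact Or.inl hkmem
          · exact Or.inr h''
    · have hlt : ∀ a ∈ acc, a < k := by
        intro a ha
        rcases lt_or_eq_of_le (hle a ha k (by simp)) with h' | rfl
        · exact h'
        · exfalso
          have hne : acc ≠ [] := by intro h'; subst h'; simp at ha
          obtain ⟨m, hm⟩ := Option.isSome_iff_exists.1 (List.getLast?_isSome.2 hne)
          have h1 : a ≤ m := le_getLast_of_pairwise_lt hacc hm ha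
          have h2 : m ≤ a := hle m (List.mem_of_getLast? hm) a (by simp)
          exact hlast (by rw [hm, le_antisymm h2 h1])
      have hacc' : (acc ++ [k]).Pairwise (· < ·) := by
        rw [List.pairwise_append]
        exact ⟨hacc, by simp, by simpa using hlt⟩
      have hle' : ∀ a ∈ acc ++ [k], ∀ x ∈ rest, a ≤ x := by
        intro a ha x hx
        rcases List.mem_append.1 ha with h' | h'
        · exact hle a h' x (by simp [hx])
        · simp at h'; subst h'; exact hk x hx
      have h := ih (acc ++ [k]) hacc' hrest hle'
      refine ⟨by simpa [hlast] using h.1, ?_⟩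
      intro y
      have := h.2 y
      simp only [List.foldl_cons, if_neg hlast]
      rw [this]
      simp [or_assoc]

-- two strictly increasing lists with the same members are equal
theorem strict_sorted_ext {xs ys : List String}
    (hx : xs.Pairwise (· < ·)) (hy : ys.Pairwise (· < ·))
    (h : ∀ y, y ∈ xs ↔ y ∈ ys) : xs = ys := by
  have hnx : xs.Nodup := hx.imp ne_of_lt
  have hny : ys.Nodup := hy.imp ne_of_lt
  exact List.Perm.eq_of_pairwise (fun a b _ _ h1 h2 => le_antisymm h1 h2)
    (hx.imp le_of_lt) (hy.imp le_of_lt) ((List.perm_ext_iff_of_nodup hnx hny).2 h)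

-- ===== VERDICT (by name: the statement is the Claim_ definition above) =====
theorem get_list_dist_keys_py_spec : Claim_equal_get_list_dist_keys_py := by
  intro data _
  show _ = _
  unfold get_list_dist_keys_py get_list_dist_keys_py_alt
  simp only []
  rw [aKeys_eq_flat_fold, flat_fold_eq_ofList, PySem.List.foldl_append_eq_flatMap]
  set L := data.flatMap (fun item => item.map Prod.fst) with hL
  have hB := dd_inv (PySem.List.sorted ([] ++ L) (fun x => x) false) []
    (by simp) (PySem.List.sorted_pairwise ([] ++ L) (fun x => x))
    (by simp)
  apply strict_sorted_ext
  · exact PySem.List.sorted_ofList_pairwise_lt (xs := L)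
  · exact hB.1
  · intro y
    rw [hB.2 y]
    simp [PySem.List.mem_sorted, PySem.Set.mem_ofList]
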